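-- pv_equiv track=rewrite | github.com/ChinmayRathod/Advent-Of-Code | 2025/day4/day4.py | part2Def
-- ===== SOURCE A (Python) =====
-- def subFromMatrix( i, j, matrix):
--     directions = [(-1, 0), (1, 0), (0, -1), (0, 1), (-1, -1), (-1, 1), (1, -1), (1, 1)]
--     for direction in directions:
--         ni, nj = i + direction[0], j + direction[1]
--         if 0 <= ni < len(matrix) and 0 <= nj < len(matrix[0]):
--             matrix[ni][nj] -= 1
--
-- def part2Def(matrix, data):
--     part2 = 0
--     i = 0
--     while i < len(data):
--         j = 0
--         while j < len(data[0]):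
--             if data[i][j] == '@' and matrix[i][j] < 4:
--                 subFromMatrix(i, j, matrix)
--                 part2 += 1
--                 data[i][j] = '.'
--                 i = max(i - 2, 0)
--                 j = max(j - 2, 0)
--             else:
--                 j += 1
--         i += 1
--     return part2
-- ===== SOURCE B (Python) =====
-- # B: instead of A's single backtracking sweep (resume at (i-2, j-2) after each
-- # removal), repeatedly search the grid from the top-left for the first eligible
-- # cell and remove it until none is left.  Works on private copies: unlike A it
-- # does not mutate `matrix`/`data` (the equivalence is about the return value).
-- def subFromMatrix(i, j, matrix):
--     directions = [(-1, 0), (1, 0), (0, -1), (0, 1), (-1, -1), (-1, 1), (1, -1), (1, 1)]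
--     for direction in directions:
--         ni, nj = i + direction[0], j + direction[1]
--         if 0 <= ni < len(matrix) and 0 <= nj < len(matrix[0]):
--             matrix[ni][nj] -= 1
--
-- def part2Def(matrix, data):
--     h = len(data)
--     w = len(data[0]) if data else 0
--     m = [row[:] for row in matrix]
--     g = [row[:] for row in data]
--
--     def findEligible():
--         for i in range(h):
--             for j in range(w):
--                 if g[i][j] == '@' and m[i][j] < 4:
--                     return (i, j)
--         return None
--
--     count = 0
--     while True:
--         p = findEligible()
--         if p is None:
--             return count
--         i, j = p
--         subFromMatrix(i, j, m)
--         g[i][j] = '.'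
--         count += 1
-- ===== Notes on version B (the rewrite author's own statement) =====
-- stated objective: simpler
-- what changed: A performs one backtracking sweep that resumes at (max(i-2,0), max(j-2,0)) after each removal and mutates its arguments; B repeatedly searches copies of the grid from the top-left for the first eligible '@' cell and removes it until none remains, with no resume-index arithmetic (return value only: B does not mutate matrix/data).
-- outside the precondition, e.g. on part2Def([[9]], [['@'], ['X', 'Y']]): A returns 0, B returns 0
import Mathlib
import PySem

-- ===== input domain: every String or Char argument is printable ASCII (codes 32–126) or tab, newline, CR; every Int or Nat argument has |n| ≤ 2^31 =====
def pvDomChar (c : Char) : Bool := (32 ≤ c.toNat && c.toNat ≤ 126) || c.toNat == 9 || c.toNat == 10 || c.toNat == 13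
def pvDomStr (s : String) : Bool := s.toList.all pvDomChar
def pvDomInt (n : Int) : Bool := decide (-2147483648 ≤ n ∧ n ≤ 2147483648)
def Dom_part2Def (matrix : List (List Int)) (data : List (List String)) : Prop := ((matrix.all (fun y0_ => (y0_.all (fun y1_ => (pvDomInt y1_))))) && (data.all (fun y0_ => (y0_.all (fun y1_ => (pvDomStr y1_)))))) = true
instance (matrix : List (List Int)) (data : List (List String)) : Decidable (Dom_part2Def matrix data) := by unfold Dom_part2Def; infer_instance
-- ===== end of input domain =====

-- B changes the control structure only: instead of A's backtracking sweep that resumes at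
-- (max(i-2,0), max(j-2,0)) after each removal, B repeatedly searches from the top-left for the
-- first eligible cell and removes it until none remains.  A mutates `matrix`/`data` in place,
-- B works on copies: the equivalence proved here is about the RETURN value only.
-- (Both loops carry an explicit fuel argument that provably never runs out — a totality guard only.)

-- ===== PORT A =====
-- shared cell helpers: Python's g[i][j] reads; an out-of-range read returns the default
-- (Python would raise there; such inputs are excluded by Pre_part2Def)
def eligCell (mat : List (List Int)) (dat : List (List String)) (i j : Nat) : Bool :=
  ((dat.getD i []).getD j "") == "@" && decide ((mat.getD i []).getD j 0 < 4)

def removeCell (dat : List (List String)) (i j : Nat) : List (List String) :=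
  dat.modify i (fun row => row.set j ".")

-- number of '@' cells still present (used only to size the fuel of the loops)
def atCount (dat : List (List String)) : Nat := (dat.map (fun r => r.count "@")).sum

def pyDirections : List (Int × Int) :=
  [(-1, 0), (1, 0), (0, -1), (0, 1), (-1, -1), (-1, 1), (1, -1), (1, 1)]

def subStep (i j : Int) (m : List (List Int)) (d : Int × Int) : List (List Int) :=
  if 0 ≤ i + d.1 ∧ i + d.1 < (m.length : Int) ∧ 0 ≤ j + d.2 ∧ j + d.2 < ((m.getD 0 []).length : Int) then
    m.modify (i + d.1).toNat (fun row => row.modify (j + d.2).toNat (fun x => x - 1))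
  else m

def subFromMatrix (i j : Int) (matrix : List (List Int)) : List (List Int) :=
  pyDirections.foldl (subStep i j) matrix

-- A's nested while loops, with the backtracking resume `i = max(i-2,0); j = max(j-2,0)`
-- rendered by Nat truncated subtraction; `fuel` only guards totality (Lemma `loopAF_eq`
-- is applied with enough fuel for the loop to finish on its own).
def loopAF (h w : Nat) : Nat → List (List Int) → List (List String) → Nat → Nat → Int → Int
  | 0, _, _, _, _, acc => acc
  | fuel + 1, mat, dat, i, j, acc =>
    if i < h then
      if j < w then
        if eligCell mat dat i j then
          loopAF h w fuel (subFromMatrix (i : Int) (j : Int) mat) (removeCell dat i j)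
            (i - 2) (j - 2) (acc + 1)
        else
          loopAF h w fuel mat dat i (j + 1) acc
      else
        loopAF h w fuel mat dat (i + 1) 0 acc
    else acc

def part2Def (matrix : List (List Int)) (data : List (List String)) : Int :=
  loopAF data.length (data.headD []).length
    ((atCount data + 1) * ((data.length + 1) * ((data.headD []).length + 1) + 1))
    matrix data 0 0 0

-- ===== PORT B =====
-- `findEligible`: scan row i from column j (countdown `left` = columns still to scan)
def findCol (mat : List (List Int)) (dat : List (List String)) (i : Nat) :
    Nat → Nat → Option Nat
  | _, 0 => none
  | j, left + 1 => if eligCell mat dat i j then some j else findCol mat dat i (j + 1) left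

-- scan rows from i (countdown `left` = rows still to scan), each row from column 0
def findRow (mat : List (List Int)) (dat : List (List String)) :
    Nat → Nat → Nat → Option (Nat × Nat)
  | _, 0, _ => none
  | i, left + 1, w =>
    match findCol mat dat i 0 w with
    | some j => some (i, j)
    | none => findRow mat dat (i + 1) left w

-- B's outer loop: find the first eligible cell, remove it, repeat; one removal per round,
-- so `atCount data + 1` rounds of fuel provably suffice.
def loopBF (h w : Nat) : Nat → List (List Int) → List (List String) → Int → Int
  | 0, _, _, count => count
  | fuel + 1, mat, dat, count =>
    match findRow mat dat 0 h w with
    | none => count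
    | some (i, j) =>
        loopBF h w fuel (subFromMatrix (i : Int) (j : Int) mat) (removeCell dat i j) (count + 1)

def part2Def_alt (matrix : List (List Int)) (data : List (List String)) : Int :=
  loopBF data.length (data.headD []).length (atCount data + 1) matrix data 0

-- ===== PRECONDITION & SPEC =====
-- Pre_ excludes inputs where Python A raises IndexError: ragged `data` (a row shorter than
-- row 0), and — only when an '@' cell exists, since `matrix` is touched only then — a `matrix`
-- too small/ragged to cover the scan and the neighbour decrements.  This over-approximates:
-- a few inputs where '@' cells exist but never become eligible (so A returns) are excluded too.
def Pre_part2Def (matrix : List (List Int)) (data : List (List String)) : Prop :=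
  (∀ row ∈ data, (data.headD []).length ≤ row.length) ∧
  ((∃ i < data.length, ∃ j < (data.headD []).length, (data.getD i []).getD j "" = "@") →
    (data.length ≤ matrix.length ∧
      ∀ row ∈ matrix, (data.headD []).length ≤ row.length ∧
        min (matrix.headD []).length ((data.headD []).length + 1) ≤ row.length))

instance (matrix : List (List Int)) (data : List (List String)) :
    Decidable (Pre_part2Def matrix data) := by unfold Pre_part2Def; infer_instance

def pvWitness_part2Def : List (List Int) × List (List String) :=
  ([[1, 2], [3, 4]], [["@", "."], [".", "@"]])

def Spec_part2Def (matrix : List (List Int)) (data : List (List String)) (out : Int) : Prop :=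
  out = part2Def_alt matrix data
instance (matrix : List (List Int)) (data : List (List String)) (out : Int) :
    Decidable (Spec_part2Def matrix data out) := by unfold Spec_part2Def; infer_instance

-- ===== CLAIM (what is proved, stated in full; the proofs are below) =====
def Claim_equal_part2Def : Prop := ∀ (matrix : List (List Int)) (data : List (List String)),
  Dom_part2Def matrix data → Pre_part2Def matrix data →
  Spec_part2Def matrix data (part2Def matrix data)

-- ===== LEMMAS AND PROOFS =====

theorem count_set_lt (row : List String) (j : Nat) (h : row.getD j "" = "@") :
    (row.set j ".").count "@" < row.count "@" := by
  induction row generalizing j with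
  | nil => simp [List.getD] at h
  | cons a t ih =>
    cases j with
    | zero =>
      simp [List.getD] at h
      subst h
      simp
    | succ j =>
      simp [List.getD] at h
      have := ih j h
      simp only [List.set_cons_succ, List.count_cons]
      omega

theorem atCount_remove (dat : List (List String)) (i j : Nat)
    (h : (dat.getD i []).getD j "" = "@") :
    atCount (removeCell dat i j) < atCount dat := by
  induction dat generalizing i with
  | nil => simp [List.getD] at h
  | cons r t ih =>
    cases i with
    | zero =>
      simp [List.getD] at h
      simp [removeCell, atCount, List.modify]
      have := count_set_lt r j h
      omega
    | succ i =>
      simp [List.getD] at h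
      have := ih i h
      simp [removeCell, atCount, List.modify] at this ⊢
      omega

theorem elig_at (mat : List (List Int)) (dat : List (List String)) (i j : Nat)
    (he : eligCell mat dat i j = true) : (dat.getD i []).getD j "" = "@" := by
  simp only [eligCell, Bool.and_eq_true, beq_iff_eq] at he
  exact he.1

theorem cell_removeCell_ne (dat : List (List String)) (i j r c : Nat)
    (hne : r ≠ i ∨ c ≠ j) :
    ((removeCell dat i j).getD r []).getD c "" = (dat.getD r []).getD c "" := by
  simp only [removeCell, List.getD_eq_getElem?_getD, List.getElem?_modify]
  cases dat[r]? with
  | none => rfl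
  | some row =>
    simp only [Option.map_eq_map, Option.map_some, Option.getD_some]
    rcases hne with hr | hc
    · rw [if_neg (by omega)]
    · by_cases hir : i = r
      · rw [if_pos hir, List.getElem?_set_ne (by omega : j ≠ c)]
      · rw [if_neg hir]

theorem cell_subStep_ne (i j : Int) (m : List (List Int)) (d : Int × Int) (r c : Nat)
    (hd : -1 ≤ d.1 ∧ -1 ≤ d.2) (h : (r : Int) + 1 < i ∨ (c : Int) + 1 < j) :
    (((subStep i j m d).getD r []).getD c 0) = ((m.getD r []).getD c 0) := by
  unfold subStep
  split
  · next hg =>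
    have hni : ((i + d.1).toNat : Int) = i + d.1 := Int.toNat_of_nonneg hg.1
    have hnj : ((j + d.2).toNat : Int) = j + d.2 := Int.toNat_of_nonneg hg.2.2.1
    simp only [List.getD_eq_getElem?_getD, List.getElem?_modify]
    cases m[r]? with
    | none => rfl
    | some row =>
      simp only [Option.map_eq_map, Option.map_some, Option.getD_some]
      rcases h with hr | hc
      · rw [if_neg (by omega)]
      · by_cases hir : (i + d.1).toNat = r
        · rw [if_pos hir, List.getElem?_modify]
          cases row[c]? with
          | none => rfl
          | some x =>
            simp only [Option.map_eq_map, Option.map_some, Option.getD_some]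
            rw [if_neg (by omega)]
        · rw [if_neg hir]
  · rfl

theorem cell_foldl_sub_ne (i j : Int) (ds : List (Int × Int)) (m : List (List Int)) (r c : Nat)
    (hds : ∀ d ∈ ds, -1 ≤ d.1 ∧ -1 ≤ d.2) (h : (r : Int) + 1 < i ∨ (c : Int) + 1 < j) :
    (((ds.foldl (subStep i j) m).getD r []).getD c 0) = ((m.getD r []).getD c 0) := by
  induction ds generalizing m with
  | nil => rfl
  | cons d t ih =>
    rw [List.foldl_cons, ih (subStep i j m d) (fun x hx => hds x (List.mem_cons_of_mem d hx)),
      cell_subStep_ne i j m d r c (hds d List.mem_cons_self) h]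

theorem cellM_sub_ne (i j : Int) (m : List (List Int)) (r c : Nat)
    (h : (r : Int) + 1 < i ∨ (c : Int) + 1 < j) :
    (((subFromMatrix i j m).getD r []).getD c 0) = ((m.getD r []).getD c 0) := by
  apply cell_foldl_sub_ne i j pyDirections m r c _ h
  decide

theorem elig_pres (mat : List (List Int)) (dat : List (List String)) (i j r c : Nat)
    (h : r + 1 < i ∨ c + 1 < j) :
    eligCell (subFromMatrix (i : Int) (j : Int) mat) (removeCell dat i j) r c
      = eligCell mat dat r c := by
  unfold eligCell
  rw [cell_removeCell_ne dat i j r c (by omega),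
    cellM_sub_ne (i : Int) (j : Int) mat r c (by omega)]

theorem findCol_none (mat : List (List Int)) (dat : List (List String)) (i : Nat) :
    ∀ left j, (∀ c, j ≤ c → c < j + left → eligCell mat dat i c = false) →
    findCol mat dat i j left = none := by
  intro left
  induction left with
  | zero => intro j _; rfl
  | succ left ih =>
    intro j h
    rw [findCol, if_neg (by simp [h j le_rfl (by omega)])]
    exact ih (j + 1) (fun c hc hcw => h c (by omega) (by omega))

theorem findCol_first (mat : List (List Int)) (dat : List (List String)) (i c : Nat) :
    ∀ left j, j ≤ c → c < j + left → eligCell mat dat i c = true →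
    (∀ c', j ≤ c' → c' < c → eligCell mat dat i c' = false) →
    findCol mat dat i j left = some c := by
  intro left
  induction left with
  | zero => intro j _ h2; omega
  | succ left ih =>
    intro j hjc hc he hmin
    by_cases hec : j = c
    · subst hec
      rw [findCol, if_pos he]
    · rw [findCol, if_neg (by simp [hmin j le_rfl (by omega)])]
      exact ih (j + 1) (by omega) (by omega) he (fun c' h1 h2 => hmin c' (by omega) h2)

theorem findRow_none (mat : List (List Int)) (dat : List (List String)) (w : Nat) :
    ∀ left i, (∀ r c, i ≤ r → r < i + left → c < w → eligCell mat dat r c = false) →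
    findRow mat dat i left w = none := by
  intro left
  induction left with
  | zero => intro i _; rfl
  | succ left ih =>
    intro i hno
    rw [findRow, findCol_none mat dat i w 0 (fun c _ hcw => hno i c le_rfl (by omega) (by omega))]
    exact ih (i + 1) (fun r c hr hrl hc => hno r c (by omega) (by omega) hc)

theorem findRow_first (mat : List (List Int)) (dat : List (List String)) (w i j : Nat)
    (hj : j < w) (he : eligCell mat dat i j = true)
    (hrows : ∀ r c, r < i → c < w → eligCell mat dat r c = false)
    (hcols : ∀ c, c < j → eligCell mat dat i c = false) :
    ∀ left i0, i0 ≤ i → i < i0 + left → findRow mat dat i0 left w = some (i, j) := by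
  intro left
  induction left with
  | zero => intro i0 h1 h2; omega
  | succ left ih =>
    intro i0 hi0 hlt
    by_cases heq : i0 = i
    · subst heq
      rw [findRow, findCol_first mat dat i0 j w 0 (Nat.zero_le _) (by omega) he
        (fun c' _ h2 => hcols c' h2)]
    · rw [findRow, findCol_none mat dat i0 w 0
        (fun c _ hcw => hrows i0 c (by omega) (by omega))]
      exact ih (i0 + 1) (by omega) (by omega)

theorem loopBF_acc (h w : Nat) :
    ∀ fuel mat dat (c : Int), loopBF h w fuel mat dat c = c + loopBF h w fuel mat dat 0 := by
  intro fuel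
  induction fuel with
  | zero => intro mat dat c; simp [loopBF]
  | succ fuel ih =>
    intro mat dat c
    rw [loopBF, loopBF]
    cases hfind : findRow mat dat 0 h w with
    | none => ring
    | some p =>
      obtain ⟨i, j⟩ := p
      dsimp only
      rw [ih (subFromMatrix (i : Int) (j : Int) mat) (removeCell dat i j) (c + 1),
        ih (subFromMatrix (i : Int) (j : Int) mat) (removeCell dat i j) (0 + 1)]
      ring

theorem loopAF_eq (h w : Nat) :
    ∀ fuelA mat dat (i j : Nat) (acc : Int), i ≤ h → j ≤ w →
    (∀ r c, r < h → c < w → (r < i ∨ (r = i ∧ c < j)) → eligCell mat dat r c = false) →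
    atCount dat * ((h + 1) * (w + 1) + 1) + (h - i) * (w + 1) + (w - j) < fuelA →
    ∀ fuelB, atCount dat < fuelB →
    loopAF h w fuelA mat dat i j acc = acc + loopBF h w fuelB mat dat 0 := by
  intro fuelA
  induction fuelA with
  | zero => intro mat dat i j acc _ _ _ hM; omega
  | succ fuelA ih =>
    intro mat dat i j acc hi hj inv hM fuelB hB
    rw [loopAF]
    by_cases hih : i < h
    · rw [if_pos hih]
      by_cases hjw : j < w
      · rw [if_pos hjw]
        by_cases he : eligCell mat dat i j = true
        · rw [if_pos he]
          have hf : ∀ left i0, i0 ≤ i → i < i0 + left → findRow mat dat i0 left w = some (i, j) :=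
            findRow_first mat dat w i j hjw he
              (fun r c hr hc => inv r c (by omega) hc (by omega))
              (fun c hc => inv i c hih (by omega) (by omega))
          have hdrop := atCount_remove dat i j (elig_at mat dat i j he)
          have inv' : ∀ r c, r < h → c < w → (r < i - 2 ∨ (r = i - 2 ∧ c < j - 2)) →
              eligCell (subFromMatrix (i : Int) (j : Int) mat) (removeCell dat i j) r c
                = false := by
            intro r c hr hc hlt
            rw [elig_pres mat dat i j r c (by omega)]
            exact inv r c hr hc (by omega)
          cases fuelB with
          | zero => omega
          | succ fuelB =>
            have hM' : atCount (removeCell dat i j) * ((h + 1) * (w + 1) + 1)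
                + (h - (i - 2)) * (w + 1) + (w - (j - 2)) < fuelA := by
              have e1 : (atCount (removeCell dat i j) + 1) * ((h + 1) * (w + 1) + 1)
                  = atCount (removeCell dat i j) * ((h + 1) * (w + 1) + 1)
                    + ((h + 1) * (w + 1) + 1) := by ring
              have e2 : (h + 1) * (w + 1) = h * (w + 1) + w + 1 := by ring
              have l1 : (atCount (removeCell dat i j) + 1) * ((h + 1) * (w + 1) + 1)
                  ≤ atCount dat * ((h + 1) * (w + 1) + 1) :=
                Nat.mul_le_mul_right _ (by omega)
              have l2 : (h - (i - 2)) * (w + 1) ≤ h * (w + 1) :=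
                Nat.mul_le_mul_right _ (by omega)
              omega
            rw [loopBF, hf h 0 (Nat.zero_le _) (by omega)]
            dsimp only
            rw [loopBF_acc h w fuelB (subFromMatrix (i : Int) (j : Int) mat)
                (removeCell dat i j) (0 + 1),
              ih (subFromMatrix (i : Int) (j : Int) mat) (removeCell dat i j)
                (i - 2) (j - 2) (acc + 1) (by omega) (by omega) inv' hM' fuelB (by omega)]
            ring
        · rw [if_neg he]
          refine ih mat dat i (j + 1) acc (by omega) (by omega) ?_ (by omega) fuelB hB
          intro r c hr hc hlt
          by_cases hcj : r = i ∧ c = j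
          · obtain ⟨h1, h2⟩ := hcj
            subst h1; subst h2
            simpa using he
          · exact inv r c hr hc (by omega)
      · rw [if_neg hjw]
        have e3 : (h - i) * (w + 1) = (h - (i + 1)) * (w + 1) + (w + 1) := by
          rw [show h - i = (h - (i + 1)) + 1 from by omega]
          ring
        refine ih mat dat (i + 1) 0 acc (by omega) (by omega) ?_ (by omega) fuelB hB
        intro r c hr hc hlt
        exact inv r c hr hc (by omega)
    · rw [if_neg hih]
      cases fuelB with
      | zero => omega
      | succ fuelB =>
        rw [loopBF,
          findRow_none mat dat w h 0 (fun r c _ hr hc => inv r c (by omega) hc (by omega))]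
        ring

-- ===== VERDICT (by name: the statement is the Claim_ definition above) =====
theorem part2Def_spec : Claim_equal_part2Def := by
  intro matrix data _ _
  unfold Spec_part2Def part2Def part2Def_alt
  have hfuel : atCount data * ((data.length + 1) * ((data.headD []).length + 1) + 1)
      + (data.length - 0) * ((data.headD []).length + 1) + ((data.headD []).length - 0)
      < (atCount data + 1) * ((data.length + 1) * ((data.headD []).length + 1) + 1) := by
    simp only [Nat.sub_zero]
    have e1 : (atCount data + 1) * ((data.length + 1) * ((data.headD []).length + 1) + 1)
        = atCount data * ((data.length + 1) * ((data.headD []).length + 1) + 1)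
          + ((data.length + 1) * ((data.headD []).length + 1) + 1) := by ring
    have e2 : (data.length + 1) * ((data.headD []).length + 1)
        = data.length * ((data.headD []).length + 1) + (data.headD []).length + 1 := by ring
    omega
  have := loopAF_eq data.length (data.headD []).length
    ((atCount data + 1) * ((data.length + 1) * ((data.headD []).length + 1) + 1))
    matrix data 0 0 0 (Nat.zero_le _) (Nat.zero_le _)
    (by intro r c _ _ hlt; omega) hfuel (atCount data + 1) (by omega)
  simpa using this
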